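-- pv_equiv track=rewrite | github.com/jmchandonia/CORAL | convert/spark-minio/convert_bricks.py | is_descendant
-- ===== SOURCE A (Python) =====
-- from typing import Dict, List, Tuple, Union, Optional, Set
--
-- def is_descendant(
--     child_id: str,
--     ancestor_id: str,
--     parent_map: Dict[str, List[str]],
-- ) -> bool:
--     """Return True if *ancestor_id* appears anywhere in the ancestry of *child_id*."""
--     if child_id == ancestor_id:
--         return True
--     visited = set()
--     stack = list(parent_map.get(child_id, []))
--     while stack:
--         cur = stack.pop()
--         if cur == ancestor_id:
--             return True
--         if cur in visited:
--             continue
--         visited.add(cur)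
--         stack.extend(parent_map.get(cur, []))
--     return False
-- ===== SOURCE B (Python) =====
-- def is_descendant(
--     child_id: str,
--     ancestor_id: str,
--     parent_map,
-- ) -> bool:
--     """Return True if *ancestor_id* appears anywhere in the ancestry of *child_id*.
--
--     Round-based fixed-point saturation instead of an explicit DFS stack: grow the
--     set of known ancestors by one expansion round at a time; len(parent_map) + 1
--     rounds always reach the fixed point, then test membership once.
--     """
--     if child_id == ancestor_id:
--         return True
--     reach = set(parent_map.get(child_id, []))
--     for _ in range(len(parent_map) + 1):
--         reach = reach | {p for x in reach for p in parent_map.get(x, [])}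
--     return ancestor_id in reach
-- ===== Notes on version B (the rewrite author's own statement) =====
-- stated objective: alternative
-- what changed: Replaced the explicit-stack DFS with early return and visited set by round-based fixed-point saturation: repeatedly union the ancestor set with the parents of all its members until saturated (len(parent_map)+1 rounds suffice), then test membership once.
import Mathlib
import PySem

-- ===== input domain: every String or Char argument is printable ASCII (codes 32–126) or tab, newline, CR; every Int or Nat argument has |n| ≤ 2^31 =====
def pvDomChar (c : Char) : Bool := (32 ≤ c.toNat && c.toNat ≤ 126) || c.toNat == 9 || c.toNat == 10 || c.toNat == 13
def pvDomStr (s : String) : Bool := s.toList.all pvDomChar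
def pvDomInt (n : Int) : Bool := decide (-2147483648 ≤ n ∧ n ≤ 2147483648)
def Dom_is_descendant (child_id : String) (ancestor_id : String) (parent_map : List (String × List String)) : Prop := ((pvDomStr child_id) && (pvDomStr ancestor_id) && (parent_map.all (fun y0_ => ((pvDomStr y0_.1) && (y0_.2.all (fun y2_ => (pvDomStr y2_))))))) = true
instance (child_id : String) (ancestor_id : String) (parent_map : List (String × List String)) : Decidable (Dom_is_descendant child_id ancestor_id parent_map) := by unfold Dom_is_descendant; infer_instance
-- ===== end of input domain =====

-- B replaces A's explicit-stack DFS by round-based fixed-point saturation of the ancestor set (alternative decomposition, same return value everywhere).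

-- parent_map.get(k, []) — first-match association-list lookup, shared by both ports
def pget (pm : List (String × List String)) (k : String) : List String :=
  PySem.Dict.getD (PySem.Dict.mk pm) k []

-- ===== PORT A =====
-- termination measure for A's while-loop: stack size plus the total budget of not-yet-visited entries
def pvWeight (pm : List (String × List String)) (visited : PySem.Set String) : Nat :=
  (pm.map (fun e => if visited.contains e.1 then 0 else e.2.length + 1)).sum

lemma contains_add_of_contains {s : PySem.Set String} {x y : String}
    (h : s.contains y = true) : (PySem.Set.add s x).contains y = true := by
  rw [PySem.Set.contains_iff] at h ⊢
  exact (PySem.Set.mem_add s x y).mpr (Or.inl h)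

lemma pvWeight_mono (pm : List (String × List String)) (visited : PySem.Set String) (cur : String) :
    pvWeight pm (PySem.Set.add visited cur) ≤ pvWeight pm visited := by
  induction pm with
  | nil => exact Nat.le_refl 0
  | cons e rest ih =>
    simp only [pvWeight, List.map_cons, List.sum_cons]
    refine Nat.add_le_add ?_ ih
    by_cases hv : visited.contains e.1 = true
    · rw [if_pos hv, if_pos (contains_add_of_contains hv)]
    · rw [if_neg hv]
      split <;> omega

lemma pvWeight_visit (pm : List (String × List String)) (visited : PySem.Set String) (cur : String)
    (h : visited.contains cur = false) :
    (pget pm cur).length + pvWeight pm (PySem.Set.add visited cur) ≤ pvWeight pm visited := by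
  induction pm with
  | nil => exact Nat.le_refl 0
  | cons e rest ih =>
    have hmem : (PySem.Set.add visited cur).contains cur = true := by
      rw [PySem.Set.contains_iff]
      exact (PySem.Set.mem_add visited cur cur).mpr (Or.inr rfl)
    by_cases hk : e.1 = cur
    · have hb : (e.1 == cur) = true := beq_iff_eq.mpr hk
      have hget : pget (e :: rest) cur = e.2 := by
        simp [pget, PySem.Dict.getD, PySem.Dict.get?, List.find?, hb]
      have hmono : pvWeight rest (PySem.Set.add visited cur) ≤ pvWeight rest visited :=
        pvWeight_mono rest visited cur
      simp only [pvWeight, List.map_cons, List.sum_cons]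
      rw [hget, hk, if_pos hmem, if_neg (by rw [h]; exact Bool.false_ne_true)]
      simp only [pvWeight] at hmono
      omega
    · have hb : (e.1 == cur) = false := beq_eq_false_iff_ne.mpr hk
      have hget : pget (e :: rest) cur = pget rest cur := by
        simp [pget, PySem.Dict.getD, PySem.Dict.get?, List.find?, hb]
      have hsame : (PySem.Set.add visited cur).contains e.1 = visited.contains e.1 := by
        rcases hc : visited.contains e.1 with _ | _
        · rcases hc2 : (PySem.Set.add visited cur).contains e.1 with _ | _
          · rfl
          · rw [PySem.Set.contains_iff] at hc2
            rcases (PySem.Set.mem_add visited cur e.1).mp hc2 with hin | heq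
            · rw [← PySem.Set.contains_iff] at hin
              rw [hin] at hc; exact hc
            · exact absurd heq hk
        · exact contains_add_of_contains hc
      simp only [pvWeight, List.map_cons, List.sum_cons]
      rw [hget, hsame]
      simp only [pvWeight] at ih
      omega

def loopA (pm : List (String × List String)) (ancestor : String)
    (visited : PySem.Set String) (stack : List String) : Bool :=
  match hs : stack.getLast? with
  | none => false                                   -- while stack: … exhausted
  | some cur =>                                     -- cur = stack.pop()
    let rest := stack.dropLast
    if cur == ancestor then true
    else if visited.contains cur then loopA pm ancestor visited rest
    else loopA pm ancestor (PySem.Set.add visited cur) (rest ++ pget pm cur)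
termination_by stack.length + pvWeight pm visited
decreasing_by
  · have hne : stack ≠ [] := by intro h; rw [h] at hs; simp at hs
    have : stack.dropLast.length = stack.length - 1 := List.length_dropLast
    have : 0 < stack.length := List.length_pos_iff.mpr hne
    omega
  · have hne : stack ≠ [] := by intro h; rw [h] at hs; simp at hs
    have h1 : stack.dropLast.length = stack.length - 1 := List.length_dropLast
    have h2 : 0 < stack.length := List.length_pos_iff.mpr hne
    have h3 : visited.contains cur = false := by simp_all
    have := pvWeight_visit pm visited cur h3
    simp only [List.length_append]
    omega

def is_descendant (child_id : String) (ancestor_id : String) (parent_map : List (String × List String)) : Bool :=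
  if child_id == ancestor_id then true
  else loopA parent_map ancestor_id PySem.Set.empty (pget parent_map child_id)

-- ===== PORT B =====
-- one saturation round: reach | {p for x in reach for p in parent_map.get(x, [])}
def expandB (pm : List (String × List String)) (reach : PySem.Set String) : PySem.Set String :=
  PySem.Set.union reach (PySem.Set.ofList (reach.flatMap (fun x => pget pm x)))

-- for _ in range(len(parent_map) + 1): reach = expand(reach)
def iterB (pm : List (String × List String)) (reach : PySem.Set String) : Nat → PySem.Set String
  | 0 => reach
  | n + 1 => iterB pm (expandB pm reach) n

def is_descendant_alt (child_id : String) (ancestor_id : String) (parent_map : List (String × List String)) : Bool :=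
  if child_id == ancestor_id then true
  else (iterB parent_map (PySem.Set.ofList (pget parent_map child_id)) (parent_map.length + 1)).contains ancestor_id

-- ===== PRECONDITION & SPEC =====
def Spec_is_descendant (child_id : String) (ancestor_id : String) (parent_map : List (String × List String)) (out : Bool) : Prop := out = is_descendant_alt child_id ancestor_id parent_map
instance (child_id : String) (ancestor_id : String) (parent_map : List (String × List String)) (out : Bool) : Decidable (Spec_is_descendant child_id ancestor_id parent_map out) := by unfold Spec_is_descendant; infer_instance

-- ===== CLAIM (what is proved, stated in full; the proofs are below) =====
def Claim_equal_is_descendant : Prop := ∀ (child_id : String) (ancestor_id : String) (parent_map : List (String × List String)), Dom_is_descendant child_id ancestor_id parent_map → Spec_is_descendant child_id ancestor_id parent_map (is_descendant child_id ancestor_id parent_map)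

-- ===== LEMMAS AND PROOFS =====

-- "x is reachable in the parent graph starting from one of the roots"
inductive PvReach (pm : List (String × List String)) (roots : List String) : String → Prop
  | base {x : String} : x ∈ roots → PvReach pm roots x
  | step {x y : String} : PvReach pm roots y → x ∈ pget pm y → PvReach pm roots x

lemma pvReach_mono {pm : List (String × List String)} {r1 r2 : List String} {x : String}
    (h : ∀ z ∈ r1, z ∈ r2) : PvReach pm r1 x → PvReach pm r2 x := by
  intro hr
  induction hr with
  | base hx => exact PvReach.base (h _ hx)
  | step _ hy ih => exact PvReach.step ih hy

lemma pget_nil_of_not_key {pm : List (String × List String)} {k : String}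
    (h : k ∉ pm.map Prod.fst) : pget pm k = [] := by
  induction pm with
  | nil => rfl
  | cons e rest ih =>
    simp only [List.map_cons, List.mem_cons, not_or] at h
    have hb : (e.1 == k) = false := beq_eq_false_iff_ne.mpr (fun he => h.1 he.symm)
    simp only [pget, PySem.Dict.getD, PySem.Dict.get?, List.find?, hb] at ih ⊢
    exact ih h.2

-- ----- A side -----

lemma loopA_true {pm : List (String × List String)} {a : String} {roots : List String} :
    ∀ (visited : PySem.Set String) (stack : List String),
    (∀ x ∈ stack, PvReach pm roots x) →
    loopA pm a visited stack = true → PvReach pm roots a := by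
  intro visited stack
  fun_induction loopA pm a visited stack with
  | case1 visited stack hs => intro _ h; simp at h
  | case2 visited stack cur hs heq =>
    intro hst _
    have hne : stack ≠ [] := by intro h; rw [h] at hs; simp at hs
    have hcur : cur ∈ stack := by
      have h1 := List.getLast?_eq_some_getLast (l := stack) hne
      rw [hs] at h1
      rw [Option.some_injective _ h1]
      exact List.getLast_mem hne
    have : cur = a := by simpa using heq
    exact this ▸ hst cur hcur
  | case3 visited stack cur hs rest heq hv ih =>
    intro hst hres
    exact ih (fun x hx => hst x (List.mem_of_mem_dropLast hx)) hres
  | case4 visited stack cur hs rest heq hv ih =>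
    intro hst hres
    have hne : stack ≠ [] := by intro h; rw [h] at hs; simp at hs
    have hcur : cur ∈ stack := by
      have h1 := List.getLast?_eq_some_getLast (l := stack) hne
      rw [hs] at h1
      rw [Option.some_injective _ h1]
      exact List.getLast_mem hne
    refine ih ?_ hres
    intro x hx
    rcases List.mem_append.mp hx with h1 | h2
    · exact hst x (List.mem_of_mem_dropLast h1)
    · exact PvReach.step (hst cur hcur) h2

lemma pvReach_in_closed {pm : List (String × List String)} {visited : List String} {x : String}
    (hcl : ∀ v ∈ visited, ∀ y ∈ pget pm v, y ∈ visited) :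
    PvReach pm visited x → x ∈ visited := by
  intro h
  induction h with
  | base hx => exact hx
  | step _ hy ih => exact hcl _ ih _ hy

lemma loopA_false {pm : List (String × List String)} {a : String} :
    ∀ (visited : PySem.Set String) (stack : List String),
    loopA pm a visited stack = false →
    (∀ v ∈ visited, ∀ y ∈ pget pm v, y ∈ visited ∨ y ∈ stack) →
    a ∉ visited →
    ∀ x, PvReach pm (stack ++ visited) x → x ≠ a := by
  intro visited stack
  fun_induction loopA pm a visited stack with
  | case1 visited stack hs =>
    intro _ hinv ha x hx
    have hnil : stack = [] := List.getLast?_eq_none_iff.mp hs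
    subst hnil
    have hcl : ∀ v ∈ visited, ∀ y ∈ pget pm v, y ∈ visited := by
      intro v hv y hy
      rcases hinv v hv y hy with h | h
      · exact h
      · simp at h
    have := pvReach_in_closed hcl (by simpa using hx)
    intro hxa; subst hxa; exact ha this
  | case2 visited stack cur hs heq => intro h; simp at h
  | case3 visited stack cur hs rest heq hv ih =>
    intro hres hinv ha x hx
    have hne : stack ≠ [] := by intro h; rw [h] at hs; simp at hs
    have hdec : stack.dropLast ++ [cur] = stack := by
      have h1 := List.getLast?_eq_some_getLast (l := stack) hne
      rw [hs] at h1
      rw [Option.some_injective _ h1]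
      exact List.dropLast_concat_getLast hne
    have hvcur : cur ∈ visited := by simpa [List.contains_iff_mem] using hv
    refine ih hres ?_ ha x ?_
    · intro v hvv y hy
      rcases hinv v hvv y hy with h | h
      · exact Or.inl h
      · rw [← hdec] at h
        rcases List.mem_append.mp h with h2 | h2
        · exact Or.inr h2
        · simp at h2; subst h2; exact Or.inl hvcur
    · refine pvReach_mono ?_ hx
      intro z hz
      rw [← hdec] at hz
      rcases List.mem_append.mp hz with h2 | h2
      · rcases List.mem_append.mp h2 with h3 | h3
        · exact List.mem_append.mpr (Or.inl h3)
        · simp at h3; subst h3; exact List.mem_append.mpr (Or.inr hvcur)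
      · exact List.mem_append.mpr (Or.inr h2)
  | case4 visited stack cur hs rest heq hv ih =>
    intro hres hinv ha x hx
    have hne : stack ≠ [] := by intro h; rw [h] at hs; simp at hs
    have hdec : stack.dropLast ++ [cur] = stack := by
      have h1 := List.getLast?_eq_some_getLast (l := stack) hne
      rw [hs] at h1
      rw [Option.some_injective _ h1]
      exact List.dropLast_concat_getLast hne
    have hcna : cur ≠ a := by simpa using heq
    have hmem_add : ∀ z, z ∈ PySem.Set.add visited cur ↔ z ∈ visited ∨ z = cur :=
      fun z => PySem.Set.mem_add visited cur z
    refine ih hres ?_ ?_ x ?_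
    · intro v hvv y hy
      rcases (hmem_add v).mp hvv with h | h
      · rcases hinv v h y hy with h2 | h2
        · exact Or.inl ((hmem_add y).mpr (Or.inl h2))
        · rw [← hdec] at h2
          rcases List.mem_append.mp h2 with h3 | h3
          · exact Or.inr (List.mem_append.mpr (Or.inl h3))
          · simp at h3; subst h3
            exact Or.inl ((hmem_add y).mpr (Or.inr rfl))
      · subst h
        exact Or.inr (List.mem_append.mpr (Or.inr hy))
    · intro hmem
      rcases (hmem_add a).mp hmem with h | h
      · exact ha h
      · exact hcna h.symm
    · refine pvReach_mono ?_ hx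
      intro z hz
      rcases List.mem_append.mp hz with h2 | h2
      · rw [← hdec] at h2
        rcases List.mem_append.mp h2 with h3 | h3
        · exact List.mem_append.mpr (Or.inl (List.mem_append.mpr (Or.inl h3)))
        · simp at h3; subst h3
          exact List.mem_append.mpr (Or.inr ((hmem_add z).mpr (Or.inr rfl)))
      · exact List.mem_append.mpr (Or.inr ((hmem_add z).mpr (Or.inl h2)))

lemma A_iff (c a : String) (pm : List (String × List String)) :
    is_descendant c a pm = true ↔ (c = a ∨ PvReach pm (pget pm c) a) := by
  unfold is_descendant
  by_cases hca : c = a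
  · simp [hca]
  · simp only [beq_iff_eq, hca, if_false]
    constructor
    · intro h
      exact Or.inr (loopA_true PySem.Set.empty (pget pm c) (fun x hx => PvReach.base hx) h)
    · intro h
      rcases h with h | h
      · exact h.elim
      · by_contra hfalse
        have hf : loopA pm a PySem.Set.empty (pget pm c) = false := by
          cases hb : loopA pm a PySem.Set.empty (pget pm c)
          · rfl
          · exact absurd hb hfalse
        have := loopA_false PySem.Set.empty (pget pm c) hf
          (by intro v hv; simp [PySem.Set.empty] at hv) (by simp [PySem.Set.empty])
          a (by simpa using h)
        exact this rfl

-- ----- B side -----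

lemma mem_expandB {pm : List (String × List String)} {r : PySem.Set String} {x : String} :
    x ∈ expandB pm r ↔ x ∈ r ∨ ∃ y ∈ r, x ∈ pget pm y := by
  simp [expandB, PySem.Set.mem_union, PySem.Set.mem_ofList, List.mem_flatMap]

lemma iterB_succ_out (pm : List (String × List String)) (r : PySem.Set String) (n : Nat) :
    iterB pm r (n + 1) = expandB pm (iterB pm r n) := by
  induction n generalizing r with
  | zero => rfl
  | succ m ih => exact ih (expandB pm r)

lemma iterB_mono_step {pm : List (String × List String)} {r : PySem.Set String} {n : Nat} {x : String}
    (h : x ∈ iterB pm r n) : x ∈ iterB pm r (n + 1) := by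
  rw [iterB_succ_out]
  exact mem_expandB.mpr (Or.inl h)

lemma iterB_mono {pm : List (String × List String)} {r : PySem.Set String} {i j : Nat} {x : String}
    (hij : i ≤ j) (h : x ∈ iterB pm r i) : x ∈ iterB pm r j := by
  induction j with
  | zero =>
    have hz : i = 0 := by omega
    subst hz; exact h
  | succ m ih =>
    rcases Nat.lt_or_ge i (m + 1) with hlt | hge
    · exact iterB_mono_step (ih (by omega))
    · have : i = m + 1 := by omega
      subst this; exact h

lemma iterB_sound {pm : List (String × List String)} {roots : List String} :
    ∀ (n : Nat) (r : PySem.Set String),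
    (∀ z ∈ r, PvReach pm roots z) → ∀ x ∈ iterB pm r n, PvReach pm roots x := by
  intro n
  induction n with
  | zero => intro r hr x hx; exact hr x hx
  | succ m ih =>
    intro r hr x hx
    refine ih (expandB pm r) ?_ x hx
    intro z hz
    rcases mem_expandB.mp hz with h | ⟨y, hy, hzy⟩
    · exact hr z h
    · exact PvReach.step (hr y hy) hzy

lemma expandB_congr {pm : List (String × List String)} {r r' : PySem.Set String}
    (h : ∀ z, z ∈ r ↔ z ∈ r') : ∀ z, z ∈ expandB pm r ↔ z ∈ expandB pm r' := by
  intro z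
  rw [mem_expandB, mem_expandB]
  constructor
  · rintro (hz | ⟨y, hy, hzy⟩)
    · exact Or.inl ((h z).mp hz)
    · exact Or.inr ⟨y, (h y).mp hy, hzy⟩
  · rintro (hz | ⟨y, hy, hzy⟩)
    · exact Or.inl ((h z).mpr hz)
    · exact Or.inr ⟨y, (h y).mpr hy, hzy⟩

lemma iterB_congr_step {pm : List (String × List String)} {r : PySem.Set String} {i j : Nat}
    (h : ∀ z, z ∈ iterB pm r i ↔ z ∈ iterB pm r j) :
    ∀ z, z ∈ iterB pm r (i + 1) ↔ z ∈ iterB pm r (j + 1) := by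
  intro z
  rw [iterB_succ_out, iterB_succ_out]
  exact expandB_congr h z

-- key-membership set at round i
def pvKS (pm : List (String × List String)) (r : PySem.Set String) (i : Nat) : Finset String :=
  (iterB pm r i).toFinset ∩ (pm.map Prod.fst).toFinset

lemma pvKS_mono {pm : List (String × List String)} {r : PySem.Set String} {i : Nat} :
    pvKS pm r i ⊆ pvKS pm r (i + 1) := by
  intro z hz
  simp only [pvKS, Finset.mem_inter, List.mem_toFinset] at *
  exact ⟨iterB_mono_step hz.1, hz.2⟩

lemma pvKS_stable_fix {pm : List (String × List String)} {r : PySem.Set String} {i : Nat}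
    (h : pvKS pm r (i + 1) ⊆ pvKS pm r i) :
    ∀ z, z ∈ iterB pm r (i + 2) ↔ z ∈ iterB pm r (i + 1) := by
  intro z
  constructor
  · intro hz
    rw [iterB_succ_out] at hz
    rcases mem_expandB.mp hz with h1 | ⟨y, hy, hzy⟩
    · exact h1
    · have hykey : y ∈ pm.map Prod.fst := by
        by_contra hnk
        rw [pget_nil_of_not_key hnk] at hzy
        simp at hzy
      have : y ∈ pvKS pm r (i + 1) := by
        simp only [pvKS, Finset.mem_inter, List.mem_toFinset]
        exact ⟨hy, hykey⟩
      have hyi : y ∈ iterB pm r i := by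
        have := h this
        simp only [pvKS, Finset.mem_inter, List.mem_toFinset] at this
        exact this.1
      rw [iterB_succ_out]
      exact mem_expandB.mpr (Or.inr ⟨y, hyi, hzy⟩)
  · exact iterB_mono_step

lemma pvKS_card_grow {pm : List (String × List String)} {r : PySem.Set String} :
    ∀ i, (∀ j < i, ¬ pvKS pm r (j + 1) ⊆ pvKS pm r j) → i ≤ (pvKS pm r i).card := by
  intro i
  induction i with
  | zero => intro _; omega
  | succ m ih =>
    intro h
    have h1 : m ≤ (pvKS pm r m).card := ih (fun j hj => h j (by omega))
    have h2 : pvKS pm r m ⊂ pvKS pm r (m + 1) :=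
      HasSubset.Subset.ssubset_of_not_subset pvKS_mono (h m (by omega))
    have := Finset.card_lt_card h2
    omega

lemma pvStabilizes {pm : List (String × List String)} {r : PySem.Set String} :
    ∃ i ≤ pm.length, ∀ z, z ∈ iterB pm r (i + 2) ↔ z ∈ iterB pm r (i + 1) := by
  by_cases h : ∃ i ≤ pm.length, pvKS pm r (i + 1) ⊆ pvKS pm r i
  · obtain ⟨i, hi, hsub⟩ := h
    exact ⟨i, hi, pvKS_stable_fix hsub⟩
  · exfalso
    have hgrow : ∀ j < pm.length + 1, ¬ pvKS pm r (j + 1) ⊆ pvKS pm r j := by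
      intro j hj hsub
      exact h ⟨j, by omega, hsub⟩
    have h1 := pvKS_card_grow (pm := pm) (r := r) (pm.length + 1) hgrow
    have h2 : (pvKS pm r (pm.length + 1)).card ≤ (pm.map Prod.fst).toFinset.card :=
      Finset.card_le_card (Finset.inter_subset_right)
    have h3 : (pm.map Prod.fst).toFinset.card ≤ pm.length := by
      have := (pm.map Prod.fst).toFinset_card_le
      simpa using this
    omega

lemma iterB_fix_forever {pm : List (String × List String)} {r : PySem.Set String} {i : Nat}
    (h : ∀ z, z ∈ iterB pm r (i + 2) ↔ z ∈ iterB pm r (i + 1)) :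
    ∀ d z, z ∈ iterB pm r (i + 1 + d) ↔ z ∈ iterB pm r (i + 1) := by
  intro d
  induction d with
  | zero => intro z; rfl
  | succ m ih =>
    intro z
    have step : ∀ z, z ∈ iterB pm r (i + 1 + m + 1) ↔ z ∈ iterB pm r (i + 2) :=
      iterB_congr_step (i := i + 1 + m) (j := i + 1) ih
    have : i + 1 + (m + 1) = i + 1 + m + 1 := by omega
    rw [this]
    exact Iff.trans (step z) (h z)

lemma iterB_closed {pm : List (String × List String)} {r : PySem.Set String} :
    ∀ y ∈ iterB pm r (pm.length + 1), ∀ x ∈ pget pm y, x ∈ iterB pm r (pm.length + 1) := by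
  obtain ⟨i, hi, hfix⟩ := pvStabilizes (pm := pm) (r := r)
  have hfor := iterB_fix_forever hfix
  intro y hy x hx
  have hN : ∀ z, z ∈ iterB pm r (pm.length + 1) ↔ z ∈ iterB pm r (i + 1) := by
    intro z
    have := hfor (pm.length + 1 - (i + 1)) z
    rwa [Nat.add_sub_cancel' (by omega)] at this
  have hN1 : ∀ z, z ∈ iterB pm r (pm.length + 2) ↔ z ∈ iterB pm r (i + 1) := by
    intro z
    have := hfor (pm.length + 2 - (i + 1)) z
    rwa [Nat.add_sub_cancel' (by omega)] at this
  have hyi : y ∈ iterB pm r (i + 1) := (hN y).mp hy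
  have hmem : x ∈ iterB pm r (pm.length + 2) := by
    have hyN : y ∈ iterB pm r (pm.length + 1) := hy
    rw [show pm.length + 2 = (pm.length + 1) + 1 from rfl, iterB_succ_out]
    exact mem_expandB.mpr (Or.inr ⟨y, hyN, hx⟩)
  exact (hN x).mpr ((hN1 x).mp hmem)

lemma iterB_complete {pm : List (String × List String)} {roots : List String} {x : String}
    (h : PvReach pm roots x) :
    x ∈ iterB pm (PySem.Set.ofList roots) (pm.length + 1) := by
  induction h with
  | base hx =>
    rename_i z
    have h0 : z ∈ iterB pm (PySem.Set.ofList roots) 0 := by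
      simpa [iterB, PySem.Set.mem_ofList] using hx
    exact iterB_mono (by omega) h0
  | step _ hy ih => exact iterB_closed _ ih _ hy

lemma B_iff (c a : String) (pm : List (String × List String)) :
    is_descendant_alt c a pm = true ↔ (c = a ∨ PvReach pm (pget pm c) a) := by
  unfold is_descendant_alt
  by_cases hca : c = a
  · simp [hca]
  · simp only [beq_iff_eq, hca, if_false, PySem.Set.contains_iff]
    constructor
    · intro h
      exact Or.inr (iterB_sound (pm.length + 1) (PySem.Set.ofList (pget pm c))
        (fun z hz => PvReach.base ((PySem.Set.mem_ofList (pget pm c) z).mp hz)) a h)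
    · rintro (h | h)
      · exact h.elim
      · exact iterB_complete h

-- ===== VERDICT (by name: the statement is the Claim_ definition above) =====
theorem is_descendant_spec : Claim_equal_is_descendant := by
  intro c a pm _
  unfold Spec_is_descendant
  have := (A_iff c a pm).trans (B_iff c a pm).symm
  cases hA : is_descendant c a pm <;> cases hB : is_descendant_alt c a pm <;> simp_all
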